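-- pv_equiv track=rewrite | github.com/abc123s/cs224n-final-project | extract_recipe_ingredients/preprocess_simple.py | add_prefixes
-- ===== SOURCE A (Python) =====
-- def add_prefixes(data):
--     """
--     We use BIO tagging/chunking to differentiate between tags
--     at the start of a tag sequence and those in the middle. This
--     is a common technique in entity recognition.
--
--     Reference: http://www.kdd.cis.ksu.edu/Courses/Spring-2013/CIS798/Handouts/04-ramshaw95text.pdf
--     """
--     prevTag = None
--     newData = []
--
--     for n, (token, tag) in enumerate(data):
--         if (tag == "OTHER"):
--             prevTag = tag
--             newData.append((token, tag))
--         else: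
--             prefix = "B" if ((prevTag is None) or (tag != prevTag)) else "I"
--             newTag = ("%s-%s" % (prefix, tag))
--
--             newData.append((token, newTag))
--             prevTag = tag
--
--     return newData
-- ===== SOURCE B (Python) =====
-- def add_prefixes(data):
--     """BIO tagging by grouping into maximal runs of equal tags:
--     each non-OTHER run starts with B-, continues with I-; OTHER runs pass through."""
--     newData = []
--     rest = data
--     while rest:
--         token, tag = rest[0]
--         k = 1
--         while k < len(rest) and rest[k][1] == tag:
--             k += 1
--         run, rest = rest[1:k], rest[k:]
--         if tag == "OTHER":
--             newData.append((token, tag))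
--             newData.extend(run)
--         else:
--             newData.append((token, "B-" + tag))
--             newData.extend((t, "I-" + tag) for t, _ in run)
--     return newData
-- ===== Notes on version B (the rewrite author's own statement) =====
-- stated objective: alternative
-- what changed: Replaces A's prevTag state machine with an outer loop over maximal equal-tag runs: each non-OTHER run emits its first token with B- and the rest with I-, OTHER runs pass through unchanged.
import Mathlib
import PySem

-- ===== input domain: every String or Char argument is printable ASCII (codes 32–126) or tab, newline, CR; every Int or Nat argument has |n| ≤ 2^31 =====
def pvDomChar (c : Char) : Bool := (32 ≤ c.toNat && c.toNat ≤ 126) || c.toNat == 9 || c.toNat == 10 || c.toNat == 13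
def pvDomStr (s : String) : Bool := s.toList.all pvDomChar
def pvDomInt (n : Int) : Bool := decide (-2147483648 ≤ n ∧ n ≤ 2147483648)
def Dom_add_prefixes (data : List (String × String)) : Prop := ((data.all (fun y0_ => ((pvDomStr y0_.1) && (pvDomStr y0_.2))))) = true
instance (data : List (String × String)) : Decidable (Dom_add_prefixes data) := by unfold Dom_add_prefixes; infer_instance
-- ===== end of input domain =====

-- B rewrites A's prevTag state machine as a loop over maximal equal-tag runs (alternative decomposition, same cost).

-- ===== PORT A =====
-- A's for-loop with state prevTag, emitting one pair per element (append-at-end rendered as cons recursion over the same state)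
def pvAGo (prevTag : Option String) : List (String × String) → List (String × String)
  | [] => []
  | (token, tag) :: rest =>
    if tag == "OTHER" then
      (token, tag) :: pvAGo (some tag) rest
    else
      let pfx := if prevTag == none || !(prevTag == some tag) then "B" else "I"
      (token, pfx ++ "-" ++ tag) :: pvAGo (some tag) rest

def add_prefixes (data : List (String × String)) : List (String × String) :=
  pvAGo none data

-- ===== PORT B =====
-- B's outer loop: split off the maximal run sharing the head's tag, emit it, recurse on the remainder
def pvBGo : List (String × String) → List (String × String)
  | [] => []
  | (token, tag) :: rest =>
    let run := rest.takeWhile (fun p => p.2 == tag)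
    let rest' := rest.dropWhile (fun p => p.2 == tag)
    (if tag == "OTHER" then (token, tag) :: run
     else (token, "B-" ++ tag) :: run.map (fun p => (p.1, "I-" ++ tag)))
    ++ pvBGo rest'
termination_by l => l.length
decreasing_by
  simp only [List.length_cons]
  exact Nat.lt_succ_of_le (List.length_dropWhile_le _ _)

def add_prefixes_alt (data : List (String × String)) : List (String × String) :=
  pvBGo data

-- ===== PRECONDITION & SPEC =====
def Spec_add_prefixes (data : List (String × String)) (out : List (String × String)) : Prop := out = add_prefixes_alt data
instance (data : List (String × String)) (out : List (String × String)) : Decidable (Spec_add_prefixes data out) := by unfold Spec_add_prefixes; infer_instance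

-- ===== CLAIM (what is proved, stated in full; the proofs are below) =====
def Claim_equal_add_prefixes : Prop := ∀ (data : List (String × String)), Dom_add_prefixes data → Spec_add_prefixes data (add_prefixes data)

-- ===== LEMMAS AND PROOFS =====

theorem pv_dropWhile_head_false {α : Type} (p : α → Bool) (l : List α) :
    ∀ h, (l.dropWhile p).head? = some h → p h = false := by
  induction l with
  | nil => intro h hh; simp [List.dropWhile] at hh
  | cons a l ih =>
    intro h hh
    rw [List.dropWhile_cons] at hh
    by_cases hp : p a = true
    · simp [hp] at hh; exact ih h hh
    · simp [hp] at hh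
      have : a = h := by simpa using hh
      subst this
      exact Bool.eq_false_iff.mpr hp

theorem pv_mem_takeWhile {α : Type} (p : α → Bool) (l : List α) :
    ∀ x ∈ l.takeWhile p, p x = true := by
  induction l with
  | nil => simp [List.takeWhile]
  | cons a l ih =>
    intro x hx
    rw [List.takeWhile_cons] at hx
    by_cases hp : p a = true
    · simp [hp] at hx
      rcases hx with h1 | h2
      · simpa [h1] using hp
      · exact ih x h2
    · simp [hp] at hx

-- a run of OTHER-tagged pairs passes through A's loop unchanged
theorem pv_aGo_other_run (run rest' : List (String × String))
    (hall : ∀ p ∈ run, p.2 = "OTHER") :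
    pvAGo (some "OTHER") (run ++ rest') = run ++ pvAGo (some "OTHER") rest' := by
  induction run with
  | nil => simp
  | cons a run ih =>
    obtain ⟨tok, tg⟩ := a
    have htg : tg = "OTHER" := hall (tok, tg) (by simp)
    subst htg
    simp only [List.cons_append, pvAGo, beq_self_eq_true, if_true]
    rw [ih (fun p hp => hall p (by simp [hp]))]

-- inside a non-OTHER run, A's loop emits I- for every element
theorem pv_aGo_tag_run (tag : String) (hne : tag ≠ "OTHER") (run rest' : List (String × String))
    (hall : ∀ p ∈ run, p.2 = tag) :
    pvAGo (some tag) (run ++ rest')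
      = run.map (fun p => (p.1, "I-" ++ tag)) ++ pvAGo (some tag) rest' := by
  induction run with
  | nil => simp
  | cons a run ih =>
    obtain ⟨tok, tg⟩ := a
    have htg : tg = tag := hall (tok, tg) (by simp)
    subst htg
    have hbeq : (tg == "OTHER") = false := beq_eq_false_iff_ne.mpr hne
    simp only [List.cons_append, pvAGo, hbeq, Bool.false_eq_true,
      beq_self_eq_true, Option.some_beq_none, Bool.not_true, Bool.or_self, if_false,
      List.map_cons]
    rw [ih (fun p hp => hall p (by simp [hp]))]
    rfl

-- main invariant: at every run boundary prev differs from the next head's tag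
theorem pv_main : ∀ (n : Nat) (l : List (String × String)) (prev : Option String),
    l.length ≤ n → (∀ h, l.head? = some h → prev ≠ some h.2) →
    pvAGo prev l = pvBGo l := by
  intro n
  induction n with
  | zero =>
    intro l prev hlen _
    have : l = [] := List.eq_nil_of_length_eq_zero (Nat.le_zero.mp hlen)
    subst this; simp [pvAGo, pvBGo]
  | succ n ih =>
    intro l prev hlen hcond
    match l with
    | [] => simp [pvAGo, pvBGo]
    | (token, tag) :: rest =>
      have hrest' : (rest.dropWhile (fun p => p.2 == tag)).length ≤ n := by
        have h1 := List.length_dropWhile_le (fun p : String × String => p.2 == tag) rest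
        have h2 : rest.length ≤ n := by simpa using Nat.le_of_succ_le_succ hlen
        omega
      have hcond' : ∀ h, (rest.dropWhile (fun p => p.2 == tag)).head? = some h →
          (some tag : Option String) ≠ some h.2 := by
        intro h hh heq
        have := pv_dropWhile_head_false (fun p : String × String => p.2 == tag) rest h hh
        have : h.2 ≠ tag := by simpa using this
        exact this (by injection heq with h'; exact h'.symm)
      have hsplit : rest = rest.takeWhile (fun p => p.2 == tag)
          ++ rest.dropWhile (fun p => p.2 == tag) :=
        (List.takeWhile_append_dropWhile).symm
      by_cases hother : tag = "OTHER"
      · subst hother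
        have hrun : ∀ p ∈ rest.takeWhile (fun q : String × String => q.2 == "OTHER"),
            p.2 = "OTHER" := fun p hp => by
          simpa using pv_mem_takeWhile _ rest p hp
        simp only [pvAGo, beq_self_eq_true, if_true, pvBGo]
        conv_lhs => rw [hsplit]
        rw [pv_aGo_other_run _ _ hrun, ih _ _ hrest' hcond']
        simp
      · have hbeq : (tag == "OTHER") = false := beq_eq_false_iff_ne.mpr hother
        have hprev : (prev == some tag) = false := by
          apply beq_eq_false_iff_ne.mpr
          exact hcond (token, tag) rfl
        have hrun : ∀ p ∈ rest.takeWhile (fun q : String × String => q.2 == tag),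
            p.2 = tag := fun p hp => by
          simpa using pv_mem_takeWhile _ rest p hp
        simp only [pvAGo, hbeq, Bool.false_eq_true, if_false, pvBGo]
        conv_lhs => rw [hsplit]
        rw [pv_aGo_tag_run tag hother _ _ hrun, ih _ _ hrest' hcond']
        have hpfx : (if prev == none || !(prev == some tag) then "B" else "I") = "B" := by
          cases prev with
          | none => rfl
          | some s => simp [hprev]
        rw [hpfx]
        simp

-- ===== VERDICT (by name: the statement is the Claim_ definition above) =====
theorem add_prefixes_spec : Claim_equal_add_prefixes := by
  intro data _
  unfold Spec_add_prefixes add_prefixes add_prefixes_alt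
  exact pv_main data.length data none (le_refl _) (fun h _ => by simp)
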